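-- pv_equiv track=rewrite | github.com/pypi-data/pypi-mirror-398 | packages/nexios_contrib/nexios_contrib-0.3.1.tar.gz/nexios_contrib-0.3.1/nexios_contrib/trusted/helpers.py | validate_host_against_patterns
-- ===== SOURCE A (Python) =====
-- from typing import List, Optional, Set
--
-- def normalize_host(host: str) -> str:
--     """Normalize a hostname to lowercase and strip whitespace."""
--     return host.lower().strip()
--
-- def is_wildcard_host(host: str) -> bool:
--     """Check if a host pattern is a wildcard pattern."""
--     return host.startswith("*")
--
-- def matches_wildcard_pattern(host: str, pattern: str) -> bool:
--     """Check if a host matches a wildcard pattern."""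
--     if not is_wildcard_host(pattern):
--         return False
--
--     # Remove the wildcard prefix
--     suffix = pattern[1:]
--
--     # Check if host ends with the suffix
--     return host.endswith(suffix)
--
-- def validate_host_against_patterns(
--     host: str,
--     allowed_patterns: List[str],
--     allowed_ports: Optional[Set[int]] = None
-- ) -> bool:
--     """
--     Validate a host against a list of allowed patterns.
--
--     Args:
--         host: The host to validate
--         allowed_patterns: List of allowed host patterns (can include wildcards)
--         allowed_ports: Optional set of allowed ports
--
--     Returns:
--         True if host is allowed, False otherwise
--     """
--     host = normalize_host(host)
--
--     # Extract port if present
--     if ":" in host: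
--         host_part, port_part = host.rsplit(":", 1)
--         if allowed_ports and port_part not in allowed_ports:
--             return False
--     else:
--         host_part = host
--
--     # Check against each pattern
--     for pattern in allowed_patterns:
--         pattern = normalize_host(pattern)
--
--         if pattern == host_part:
--             return True
--         elif is_wildcard_host(pattern):
--             if matches_wildcard_pattern(host_part, pattern):
--                 return True
--
--     return False
-- ===== SOURCE B (Python) =====
-- from typing import List, Optional, Set
--
-- def validate_host_against_patterns(
--     host: str,
--     allowed_patterns: List[str],
--     allowed_ports: Optional[Set[int]] = None
-- ) -> bool:
--     h = host.lower().strip()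
--     head, sep, tail = h.rpartition(":")
--     if sep and allowed_ports and tail not in allowed_ports:
--         return False
--     host_part = head if sep else h
--     exact = set()
--     suffixes = []
--     for p in allowed_patterns:
--         p = p.lower().strip()
--         if p.startswith("*"):
--             suffixes.append(p[1:])
--         else:
--             exact.add(p)
--     return host_part in exact or any(host_part.endswith(s) for s in suffixes)
-- ===== Notes on version B (the rewrite author's own statement) =====
-- stated objective: alternative
-- what changed: A scans the pattern list once per call with an exact/elif-wildcard branch inside the loop; B first builds an index in one pass (a set of normalized exact patterns plus a list of wildcard suffixes, extracting the port with rpartition instead of rsplit) and then answers with a single set-membership-or-suffix test.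
import Mathlib
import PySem

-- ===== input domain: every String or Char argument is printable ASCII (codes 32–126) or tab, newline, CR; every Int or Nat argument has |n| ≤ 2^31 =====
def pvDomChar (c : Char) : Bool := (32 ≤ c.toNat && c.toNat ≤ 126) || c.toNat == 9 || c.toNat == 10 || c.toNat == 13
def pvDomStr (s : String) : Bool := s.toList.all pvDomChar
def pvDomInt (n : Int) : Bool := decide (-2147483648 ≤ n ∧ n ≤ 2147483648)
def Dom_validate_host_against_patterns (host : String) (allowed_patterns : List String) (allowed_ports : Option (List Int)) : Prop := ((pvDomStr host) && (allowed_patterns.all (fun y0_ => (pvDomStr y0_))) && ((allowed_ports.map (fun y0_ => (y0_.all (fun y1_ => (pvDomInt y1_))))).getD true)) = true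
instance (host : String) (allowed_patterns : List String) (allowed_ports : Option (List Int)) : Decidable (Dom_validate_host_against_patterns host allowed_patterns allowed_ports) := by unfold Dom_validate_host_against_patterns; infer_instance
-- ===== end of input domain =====

-- B replaces A's single mixed scan over the patterns with an index-building pass (a set of exact
-- patterns plus a list of wildcard suffixes) followed by one membership-or-suffix test; same results,
-- different decomposition (objective: alternative).


-- ===== PORT A =====
def normalize_host (host : String) : String := PySem.Str.strip (PySem.Str.lower host)

def is_wildcard_host (host : String) : Bool := PySem.Str.startswith host "*"

def matches_wildcard_pattern (host : String) (pattern : String) : Bool :=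
  if !(is_wildcard_host pattern) then false
  else
    let suffix := PySem.Str.slice pattern (some 1) none
    PySem.Str.endswith host suffix

-- Python truthiness of the Optional[Set[int]] argument: None and the empty set are falsy
def aPortsTruthy : Option (List Int) → Bool
  | none => false
  | some l => !l.isEmpty

-- 'port_part not in allowed_ports': port_part is a str and allowed_ports holds ints, so the
-- membership test is always False in Python (no int compares equal to a str); exact.
def aStrInIntSet (_port_part : String) (_ports : List Int) : Bool := false

-- the 'for pattern in allowed_patterns' loop, branch for branch
def aPatternLoop (host_part : String) : List String → Bool
  | [] => false
  | p :: rest =>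
    let pattern := normalize_host p
    if pattern == host_part then true
    else if is_wildcard_host pattern then
      if matches_wildcard_pattern host_part pattern then true
      else aPatternLoop host_part rest
    else aPatternLoop host_part rest

def validate_host_against_patterns (host : String) (allowed_patterns : List String) (allowed_ports : Option (List Int)) : Bool :=
  let h := normalize_host host
  if PySem.Str.isIn ":" h then
    -- h.rsplit(":", 1) with ":" present in h: split at the last ':', located by rfind; exact here
    let i := (PySem.Str.rfind h ":").toNat
    let host_part := String.ofList (h.toList.take i)
    let port_part := String.ofList (h.toList.drop (i + 1))
    if aPortsTruthy allowed_ports && !(aStrInIntSet port_part (allowed_ports.getD [])) then false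
    else aPatternLoop host_part allowed_patterns
  else aPatternLoop h allowed_patterns

-- ===== PORT B =====
-- h.rpartition(":"): (before, sep-found?, after), splitting at the LAST ':'; ('', False, h) when absent.
-- The separator component is modelled as the Bool 'was ":" found' (Python code only tests its truthiness).
def bRPartitionColon (h : String) : String × Bool × String :=
  if PySem.Str.isIn ":" h then
    let i := (PySem.Str.rfind h ":").toNat
    (String.ofList (h.toList.take i), true, String.ofList (h.toList.drop (i + 1)))
  else ("", false, h)

-- 'tail not in allowed_ports': a str never equals an int, so membership is always False; exact.
def bTailInPorts (_tail : String) (_ports : List Int) : Bool := false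

def bPortsTruthy : Option (List Int) → Bool
  | none => false
  | some l => !l.isEmpty

-- the index-building pass: a set of normalized exact patterns and the list of wildcard suffixes
def bBuildIndex (allowed_patterns : List String) : PySem.Set String × List String :=
  allowed_patterns.foldl
    (fun acc p =>
      let q := PySem.Str.strip (PySem.Str.lower p)
      if PySem.Str.startswith q "*" then (acc.1, acc.2 ++ [PySem.Str.slice q (some 1) none])
      else (PySem.Set.add acc.1 q, acc.2))
    (PySem.Set.empty, [])

def validate_host_against_patterns_alt (host : String) (allowed_patterns : List String) (allowed_ports : Option (List Int)) : Bool :=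
  let h := PySem.Str.strip (PySem.Str.lower host)
  let r := bRPartitionColon h
  if r.2.1 && bPortsTruthy allowed_ports && !(bTailInPorts r.2.2 (allowed_ports.getD [])) then false
  else
    let host_part := if r.2.1 then r.1 else h
    let idx := bBuildIndex allowed_patterns
    PySem.Set.contains idx.1 host_part || idx.2.any (fun s => PySem.Str.endswith host_part s)

-- ===== PRECONDITION & SPEC =====
def Spec_validate_host_against_patterns (host : String) (allowed_patterns : List String) (allowed_ports : Option (List Int)) (out : Bool) : Prop := out = validate_host_against_patterns_alt host allowed_patterns allowed_ports
instance (host : String) (allowed_patterns : List String) (allowed_ports : Option (List Int)) (out : Bool) : Decidable (Spec_validate_host_against_patterns host allowed_patterns allowed_ports out) := by unfold Spec_validate_host_against_patterns; infer_instance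

-- ===== CLAIM (what is proved, stated in full; the proofs are below) =====
def Claim_equal_validate_host_against_patterns : Prop := ∀ (host : String) (allowed_patterns : List String) (allowed_ports : Option (List Int)), Dom_validate_host_against_patterns host allowed_patterns allowed_ports → Spec_validate_host_against_patterns host allowed_patterns allowed_ports (validate_host_against_patterns host allowed_patterns allowed_ports)

-- ===== LEMMAS AND PROOFS =====

-- a wildcard pattern that equals the host also suffix-matches it
lemma endswith_tail_of_eq (q : String) (hw : PySem.Str.startswith q "*" = true) :
    PySem.Str.endswith q (PySem.Str.slice q (some 1) none) = true := by
  obtain ⟨t, ht⟩ : ∃ t, q.toList = '*' :: t := by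
    have := (PySem.Chars.startswith_iff q.toList "*".toList).1 (by simpa using hw)
    rcases this with ⟨t, ht⟩
    exact ⟨t, by simpa using ht.symm⟩
  have hs : (PySem.Str.slice q (some 1) none).toList = q.toList.tail := by
    simp [PySem.List.slice_from_one]
  rw [show PySem.Str.endswith q (PySem.Str.slice q (some 1) none)
        = PySem.Chars.endswith q.toList (PySem.Str.slice q (some 1) none).toList by simp]
  rw [hs, ht]
  exact (PySem.Chars.endswith_iff _ _).2 (List.suffix_cons _ _)

-- one step of B's index build, measured by the final test
lemma test_step (hp q : String) (acc : PySem.Set String × List String) :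
    (letI acc' := if PySem.Str.startswith q "*" then
        (acc.1, acc.2 ++ [PySem.Str.slice q (some 1) none])
      else (PySem.Set.add acc.1 q, acc.2)
     PySem.Set.contains acc'.1 hp || acc'.2.any (fun s => PySem.Str.endswith hp s))
    = ((PySem.Set.contains acc.1 hp || acc.2.any (fun s => PySem.Str.endswith hp s))
        || ((q == hp) || (is_wildcard_host q && matches_wildcard_pattern hp q))) := by
  by_cases hw : PySem.Str.startswith q "*" = true
  · have hwC : PySem.Chars.startswith q.toList ['*'] = true := by simpa using hw
    have h3 : PySem.Chars.endswith q.toList (PySem.List.slice q.toList (some 1) none) = true := by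
      simpa using endswith_tail_of_eq q hw
    by_cases he : q = hp
    · subst he
      simp [hwC, h3, is_wildcard_host, matches_wildcard_pattern]
    · have hbe : (q == hp) = false := beq_eq_false_iff_ne.2 he
      simp [hwC, hbe, is_wildcard_host, matches_wildcard_pattern, Bool.or_assoc]
  · have hwC : PySem.Chars.startswith q.toList ['*'] = false := by
      simpa using Bool.eq_false_iff.2 hw
    simp [hwC, PySem.Set.mem_add, matches_wildcard_pattern, is_wildcard_host]
    by_cases hq : hp = q <;> by_cases hm : hp ∈ acc.1 <;>
      first
      | (simp [hq, hm]; done)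
      | (simp [hq, hm]; tauto)

-- B's folded index, tested against hp, computes A's pattern loop
lemma fold_eq_loop (hp : String) (ps : List String) (acc : PySem.Set String × List String) :
    (letI f := ps.foldl
        (fun acc p =>
          let q := PySem.Str.strip (PySem.Str.lower p)
          if PySem.Str.startswith q "*" then (acc.1, acc.2 ++ [PySem.Str.slice q (some 1) none])
          else (PySem.Set.add acc.1 q, acc.2)) acc
     PySem.Set.contains f.1 hp || f.2.any (fun s => PySem.Str.endswith hp s))
    = ((PySem.Set.contains acc.1 hp || acc.2.any (fun s => PySem.Str.endswith hp s))
        || aPatternLoop hp ps) := by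
  induction ps generalizing acc with
  | nil => simp [aPatternLoop]
  | cons p rest ih =>
    rw [List.foldl_cons, ih]
    rw [test_step hp (PySem.Str.strip (PySem.Str.lower p)) acc]
    have hloop : aPatternLoop hp (p :: rest)
        = (((PySem.Str.strip (PySem.Str.lower p) == hp)
            || (is_wildcard_host (PySem.Str.strip (PySem.Str.lower p))
                && matches_wildcard_pattern hp (PySem.Str.strip (PySem.Str.lower p))))
           || aPatternLoop hp rest) := by
      simp only [aPatternLoop, normalize_host]
      by_cases h1 : (PySem.Str.strip (PySem.Str.lower p) == hp) = true
      · simp [h1]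
      · have h1' := Bool.eq_false_iff.2 h1
        by_cases h2 : is_wildcard_host (PySem.Str.strip (PySem.Str.lower p)) = true
        · by_cases h3 : matches_wildcard_pattern hp (PySem.Str.strip (PySem.Str.lower p)) = true
          · simp [h1', h2, h3]
          · simp [h1', h2, Bool.eq_false_iff.2 h3]
        · simp [h1', Bool.eq_false_iff.2 h2]
    rw [hloop]
    cases PySem.Set.contains acc.1 hp <;>
      cases acc.2.any (fun s => PySem.Str.endswith hp s) <;>
      cases (PySem.Str.strip (PySem.Str.lower p) == hp) <;>
      cases (is_wildcard_host (PySem.Str.strip (PySem.Str.lower p))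
              && matches_wildcard_pattern hp (PySem.Str.strip (PySem.Str.lower p))) <;>
      cases aPatternLoop hp rest <;> rfl

lemma index_test_eq_loop (hp : String) (ps : List String) :
    (PySem.Set.contains (bBuildIndex ps).1 hp
      || (bBuildIndex ps).2.any (fun s => PySem.Str.endswith hp s)) = aPatternLoop hp ps := by
  have := fold_eq_loop hp ps (PySem.Set.empty, [])
  simpa [bBuildIndex, PySem.Set.empty, PySem.Set.contains] using this

-- ===== VERDICT (by name: the statement is the Claim_ definition above) =====
theorem validate_host_against_patterns_spec : Claim_equal_validate_host_against_patterns := by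
  intro host aps ports _
  show validate_host_against_patterns host aps ports
      = validate_host_against_patterns_alt host aps ports
  have hpt : aPortsTruthy ports = bPortsTruthy ports := by cases ports <;> rfl
  unfold validate_host_against_patterns validate_host_against_patterns_alt bRPartitionColon
    normalize_host
  by_cases hc : PySem.Str.isIn ":" (PySem.Str.strip (PySem.Str.lower host)) = true
  · simp only [hc, if_true, aStrInIntSet, bTailInPorts, Bool.not_false, Bool.and_true, hpt]
    cases hb : bPortsTruthy ports
    · simp only [Bool.false_eq_true, if_false]
      exact (index_test_eq_loop _ aps).symm
    · simp only [Bool.true_and, if_true]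
  · have hc' := Bool.eq_false_iff.2 hc
    simp only [hc', Bool.false_eq_true, if_false, Bool.false_and]
    exact (index_test_eq_loop _ aps).symm
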